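-- pv_equiv track=rewrite | github.com/dannen/scanned_books_rebuild | tesseract_select_text_regions16.py | clean_and_reflow_text
-- ===== SOURCE A (Python) =====
-- def clean_and_reflow_text(raw_text):
--     lines = raw_text.splitlines(); dehyphenated = []; i = 0; num_lines = len(lines)
--     while i < num_lines:
--         current_line_content = lines[i]; rstripped_line = current_line_content.rstrip()
--         if rstripped_line.endswith('-') and (i + 1) < num_lines:
--             next_line_original = lines[i+1]
--             if next_line_original.strip():
--                 next_line_lstripped = next_line_original.lstrip(); is_continuation_candidate = False
--                 if next_line_lstripped:
--                     first_char_next = next_line_lstripped[0]; part_before_hyphen_on_current = rstripped_line[:-1]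
--                     if first_char_next.islower(): is_continuation_candidate = True
--                     elif first_char_next.isdigit():
--                         if part_before_hyphen_on_current and part_before_hyphen_on_current.isalnum(): is_continuation_candidate = True
--                 if is_continuation_candidate:
--                     part_before_hyphen = rstripped_line[:-1]
--                     if '-' in part_before_hyphen: dehyphenated.append(rstripped_line + next_line_lstripped)
--                     else: dehyphenated.append(part_before_hyphen + next_line_lstripped)
--                     i += 2; continue
--                 else: dehyphenated.append(rstripped_line); i += 1; continue
--             else: dehyphenated.append(rstripped_line); i += 2; continue
--         dehyphenated.append(rstripped_line); i += 1
--     reflowed_paragraphs_content = []; current_paragraph_lines = []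
--     for line_entry in dehyphenated:
--         processed_line_for_paragraph = line_entry.strip()
--         if not processed_line_for_paragraph:
--             if current_paragraph_lines: reflowed_paragraphs_content.append(" ".join(current_paragraph_lines)); current_paragraph_lines = []
--             if not reflowed_paragraphs_content or reflowed_paragraphs_content[-1]: reflowed_paragraphs_content.append("")
--         else: current_paragraph_lines.append(processed_line_for_paragraph)
--     if current_paragraph_lines: reflowed_paragraphs_content.append(" ".join(current_paragraph_lines))
--     final_text_pieces = []
--     for k, p_content_block in enumerate(reflowed_paragraphs_content):
--         if p_content_block: final_text_pieces.append(p_content_block)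
--         elif k > 0 and reflowed_paragraphs_content[k-1]: final_text_pieces.append("")
--     start_idx = 0;
--     while start_idx < len(final_text_pieces) and not final_text_pieces[start_idx]: start_idx += 1
--     end_idx = len(final_text_pieces);
--     while end_idx > start_idx and not final_text_pieces[end_idx-1]: end_idx -=1
--     return "\n\n".join(final_text_pieces[start_idx:end_idx])
-- ===== SOURCE B (Python) =====
-- def clean_and_reflow_text(raw_text):
--     # One fused pass: dehyphenate with a one-line lookahead while grouping runs of
--     # non-blank lines into paragraphs; paragraphs are joined by the four newlines
--     # that the original's surviving blank separator produces.
--     lines = raw_text.splitlines()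
--     n = len(lines)
--     paragraphs = []
--     run = []
--     i = 0
--     while i < n:
--         cur = lines[i].rstrip()
--         i += 1
--         if cur.endswith('-') and i < n:
--             nxt = lines[i]
--             if not nxt.strip():
--                 i += 1  # the blank after a hyphen-ended line is consumed
--             else:
--                 nl = nxt.lstrip()
--                 body = cur[:-1]
--                 if nl[0].islower() or (nl[0].isdigit() and body and body.isalnum()):
--                     cur = (cur if '-' in body else body) + nl
--                     i += 1
--         words = cur.strip()
--         if words:
--             run.append(words)
--         elif run:
--             paragraphs.append(" ".join(run))
--             run = []
--     if run:
--         paragraphs.append(" ".join(run))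
--     return "\n\n\n\n".join(paragraphs)
-- ===== Notes on version B (the rewrite author's own statement) =====
-- stated objective: simpler
-- what changed: A builds a dehyphenated list, then a reflow list with blank-string sentinels, then an index-based filter pass, then trims leading/trailing blanks and joins on a two-newline separator; B is one fused pass that dehyphenates with a one-line lookahead while grouping non-blank lines directly into paragraphs, joined on the four-newline separator that A's surviving blank sentinel produces.
import Mathlib
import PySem

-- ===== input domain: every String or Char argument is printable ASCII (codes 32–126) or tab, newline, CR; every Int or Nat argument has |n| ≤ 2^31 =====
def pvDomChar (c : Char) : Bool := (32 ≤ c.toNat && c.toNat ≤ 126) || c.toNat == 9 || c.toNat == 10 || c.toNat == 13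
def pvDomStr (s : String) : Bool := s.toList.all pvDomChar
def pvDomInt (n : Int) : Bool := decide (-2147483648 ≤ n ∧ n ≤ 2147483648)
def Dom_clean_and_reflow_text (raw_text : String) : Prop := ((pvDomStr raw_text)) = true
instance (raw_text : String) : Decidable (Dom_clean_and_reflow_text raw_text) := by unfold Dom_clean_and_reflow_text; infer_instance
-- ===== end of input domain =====

-- B restructures A's four phases (dehyphenated list; reflow list with blank sentinels;
-- index-based filter; trim; join on a two-newline separator) into ONE fused pass that
-- accumulates paragraphs directly and joins them on the four-newline separator that A's
-- surviving blank sentinel produces; return values proved equal on the whole domain.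

-- ===== PORT A =====
-- Python A's while loop over line indices, producing the `dehyphenated` list (cons form).
def pvA_dehyph (lines : List String) (i : Nat) : List String :=
  if h : i < lines.length then
    let rs := PySem.Str.rstrip lines[i]
    if PySem.Str.endswith rs "-" && decide (i + 1 < lines.length) then
      let nxt := lines.getD (i + 1) ""
      if PySem.Str.strip nxt ≠ "" then
        let nl := PySem.Str.lstrip nxt
        let cont : Bool :=
          if nl ≠ "" then
            let c := (PySem.Str.pyGet? nl 0).getD ' '   -- nl[0]; nl ≠ "" here, so in range
            let part := PySem.Str.slice rs none (some (-1))
            if PySem.Chars.islower c then true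
            else if PySem.Chars.isdigit c then decide (part ≠ "") && PySem.Str.strIsalnum part
            else false
          else false
        if cont then
          let part := PySem.Str.slice rs none (some (-1))
          (if PySem.Str.isIn "-" part then rs ++ nl else part ++ nl) :: pvA_dehyph lines (i + 2)
        else rs :: pvA_dehyph lines (i + 1)
      else rs :: pvA_dehyph lines (i + 2)
    else rs :: pvA_dehyph lines (i + 1)
  else []
termination_by lines.length - i

-- the body of A's reflow `for` loop; state = (reflowed_paragraphs_content, current_paragraph_lines)
def pvA_reflowStep (st : List String × List String) (line_entry : String) : List String × List String :=
  let s := PySem.Str.strip line_entry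
  if s = "" then
    let R1 := if st.2 ≠ [] then st.1 ++ [PySem.Str.join " " st.2] else st.1
    let C1 : List String := if st.2 ≠ [] then [] else st.2
    if R1 = [] ∨ R1.getLast?.getD "" ≠ "" then (R1 ++ [""], C1) else (R1, C1)
  else (st.1, st.2 ++ [s])

-- A's `for k, p in enumerate(...)` filter; prevNonempty tracks `k > 0 and reflowed[k-1]`
def pvA_finalPieces (prevNonempty : Bool) (l : List String) : List String :=
  match l with
  | [] => []
  | p :: rest =>
    if p ≠ "" then p :: pvA_finalPieces true rest
    else if prevNonempty then "" :: pvA_finalPieces false rest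
    else pvA_finalPieces false rest

def clean_and_reflow_text (raw_text : String) : String :=
  let lines := PySem.Str.splitlines raw_text
  let st := (pvA_dehyph lines 0).foldl pvA_reflowStep ([], [])
  let reflowed := if st.2 ≠ [] then st.1 ++ [PySem.Str.join " " st.2] else st.1
  let pieces := pvA_finalPieces false reflowed
  -- the two trimming while loops: start_idx skips leading empties, end_idx trailing ones
  let trimmed := ((pieces.dropWhile (· == "")).reverse.dropWhile (· == "")).reverse
  PySem.Str.join "\n\n" trimmed

-- ===== PORT B =====
-- B's in-loop lookahead merge: called with i already advanced past the current line.
def pvB_merge (lines : List String) (i : Nat) (cur : String) : String × Nat :=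
  if PySem.Str.endswith cur "-" && decide (i < lines.length) then
    let nxt := lines.getD i ""
    if PySem.Str.strip nxt = "" then (cur, i + 1)
    else
      let nl := PySem.Str.lstrip nxt
      let body := PySem.Str.slice cur none (some (-1))
      let c := (PySem.Str.pyGet? nl 0).getD ' '   -- nl[0]; nl ≠ "" here, so in range
      if PySem.Chars.islower c ||
          (PySem.Chars.isdigit c && decide (body ≠ "") && PySem.Str.strIsalnum body) then
        ((if PySem.Str.isIn "-" body then cur else body) ++ nl, i + 1)
      else (cur, i)
  else (cur, i)

theorem pvB_merge_ge (lines : List String) (i : Nat) (cur : String) :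
    i ≤ (pvB_merge lines i cur).2 := by
  simp only [pvB_merge]
  split_ifs <;> omega

-- B's single fused while loop.
def pvB_loop (lines : List String) (i : Nat) (paragraphs run : List String) : String :=
  if h : i < lines.length then
    let cur := PySem.Str.rstrip lines[i]
    let m := pvB_merge lines (i + 1) cur
    let words := PySem.Str.strip m.1
    if words ≠ "" then pvB_loop lines m.2 paragraphs (run ++ [words])
    else if run ≠ [] then pvB_loop lines m.2 (paragraphs ++ [PySem.Str.join " " run]) []
    else pvB_loop lines m.2 paragraphs run
  else
    PySem.Str.join "\n\n\n\n"
      (if run ≠ [] then paragraphs ++ [PySem.Str.join " " run] else paragraphs)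
termination_by lines.length - i
decreasing_by all_goals (have := pvB_merge_ge lines (i + 1) (PySem.Str.rstrip lines[i]); omega)

def clean_and_reflow_text_alt (raw_text : String) : String :=
  pvB_loop (PySem.Str.splitlines raw_text) 0 [] []

-- ===== PRECONDITION & SPEC =====
def Spec_clean_and_reflow_text (raw_text : String) (out : String) : Prop := out = clean_and_reflow_text_alt raw_text
instance (raw_text : String) (out : String) : Decidable (Spec_clean_and_reflow_text raw_text out) := by unfold Spec_clean_and_reflow_text; infer_instance

-- ===== CLAIM (what is proved, stated in full; the proofs are below) =====
def Claim_equal_clean_and_reflow_text : Prop := ∀ (raw_text : String), Dom_clean_and_reflow_text raw_text → Spec_clean_and_reflow_text raw_text (clean_and_reflow_text raw_text)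

-- ===== LEMMAS AND PROOFS =====

theorem pv_toList_inj {a b : String} (h : a.toList = b.toList) : a = b := by
  have := congrArg String.ofList h; simpa using this
theorem pv_lstrip_ne_empty {s : String} (h : PySem.Str.strip s ≠ "") :
    PySem.Str.lstrip s ≠ "" := by
  simp only [PySem.Str.strip, PySem.Str.lstrip, PySem.Chars.strip, PySem.Chars.lstrip,
    PySem.Chars.rstrip] at *
  intro hc
  have hl : List.dropWhile PySem.Chars.isspace s.toList = [] := by
    have := congrArg String.toList hc; simpa using this
  apply h; rw [hl]; rfl
theorem pvA_dehyph_eq_merge (lines : List String) (i : Nat) :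
    pvA_dehyph lines i =
      if _h : i < lines.length then
        (pvB_merge lines (i + 1) (PySem.Str.rstrip lines[i])).1 ::
          pvA_dehyph lines (pvB_merge lines (i + 1) (PySem.Str.rstrip lines[i])).2
      else [] := by
  rw [pvA_dehyph]
  split
  case isFalse => rfl
  case isTrue h =>
    unfold pvB_merge
    generalize PySem.Str.rstrip lines[i] = rs
    generalize lines.getD (i + 1) "" = nxt
    by_cases h1 : (PySem.Str.endswith rs "-" && decide (i + 1 < lines.length)) = true
    · simp only [if_pos h1]
      by_cases h2 : PySem.Str.strip nxt = ""
      · simp only [if_pos h2, if_neg (show ¬ PySem.Str.strip nxt ≠ "" from by simp [h2])]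
      · have hnl' : PySem.Str.lstrip nxt ≠ "" := pv_lstrip_ne_empty h2
        simp only [if_neg h2, if_pos (show PySem.Str.strip nxt ≠ "" from h2)]
        generalize hg : PySem.Str.lstrip nxt = nl
        rw [hg] at hnl'
        simp only [if_pos hnl']
        generalize (PySem.Str.pyGet? nl 0).getD ' ' = c
        generalize PySem.Str.slice rs none (some (-1)) = part
        have hcont :
            (if PySem.Chars.islower c then true
             else if PySem.Chars.isdigit c then decide (part ≠ "") && PySem.Str.strIsalnum part
             else false) =
            (PySem.Chars.islower c ||
              (PySem.Chars.isdigit c && decide (part ≠ "") && PySem.Str.strIsalnum part)) := by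
          cases PySem.Chars.islower c <;> cases PySem.Chars.isdigit c <;> simp
        rw [hcont]
        by_cases h3 : (PySem.Chars.islower c ||
            (PySem.Chars.isdigit c && decide (part ≠ "") && PySem.Str.strIsalnum part)) = true
        · simp only [if_pos h3]
          by_cases h7 : PySem.Str.isIn "-" part = true
          · simp only [if_pos h7]
          · simp only [if_neg h7]
        · simp only [if_neg h3]
    · simp only [if_neg h1]


-- the per-dehyphenated-line state transition hidden inside B's fused loop
def pvB_step (st : List String × List String) (line : String) : List String × List String :=
  let words := PySem.Str.strip line
  if words ≠ "" then (st.1, st.2 ++ [words])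
  else if st.2 ≠ [] then (st.1 ++ [PySem.Str.join " " st.2], [])
  else st

def pvB_finish (st : List String × List String) : String :=
  PySem.Str.join "\n\n\n\n" (if st.2 ≠ [] then st.1 ++ [PySem.Str.join " " st.2] else st.1)


theorem pv_concat_of_ne_nil {l : List String} (h : l ≠ []) : ∃ q p, l = q ++ [p] := by
  rcases List.eq_nil_or_concat l with h' | ⟨q, p, h'⟩
  · exact absurd h' h
  · exact ⟨q, p, by simpa using h'⟩

-- one unfolding of B's loop, phrased through pvB_merge and pvB_step
theorem pvB_loop_step (lines : List String) (i : Nat) (paragraphs run : List String) :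
    pvB_loop lines i paragraphs run =
      if _h : i < lines.length then
        pvB_loop lines (pvB_merge lines (i + 1) (PySem.Str.rstrip lines[i])).2
          (pvB_step (paragraphs, run) (pvB_merge lines (i + 1) (PySem.Str.rstrip lines[i])).1).1
          (pvB_step (paragraphs, run) (pvB_merge lines (i + 1) (PySem.Str.rstrip lines[i])).1).2
      else pvB_finish (paragraphs, run) := by
  rw [pvB_loop]
  split
  · simp only [pvB_step]
    split_ifs <;> rfl
  · rfl

-- B's fused loop = A's dehyphenation followed by a fold of pvB_step, then pvB_finish
theorem pvB_loop_eq_aux (lines : List String) :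
    ∀ (k i : Nat) (paragraphs run : List String), lines.length - i ≤ k →
      pvB_loop lines i paragraphs run =
        pvB_finish ((pvA_dehyph lines i).foldl pvB_step (paragraphs, run)) := by
  intro k
  induction k with
  | zero =>
    intro i paragraphs run hk
    have hge : ¬ i < lines.length := by omega
    rw [pvB_loop_step, pvA_dehyph_eq_merge, dif_neg hge, dif_neg hge]
    rfl
  | succ k ih =>
    intro i paragraphs run hk
    rw [pvB_loop_step, pvA_dehyph_eq_merge]
    split
    case isTrue h =>
      have hge := pvB_merge_ge lines (i + 1) (PySem.Str.rstrip lines[i])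
      rw [List.foldl_cons, ih _ _ _ (by omega)]
    case isFalse h => rfl

theorem pvB_loop_eq (lines : List String) (i : Nat) (paragraphs run : List String) :
    pvB_loop lines i paragraphs run =
      pvB_finish ((pvA_dehyph lines i).foldl pvB_step (paragraphs, run)) :=
  pvB_loop_eq_aux lines (lines.length - i) i paragraphs run (le_refl _)

-- shape invariant of A's reflow state relative to B's
def pvInv (a b : List String × List String) : Prop :=
  a.2 = b.2 ∧ (∀ x ∈ b.2, x ≠ "") ∧ (∀ p ∈ b.1, p ≠ "") ∧
    ∃ lead : Bool, a.1 = (cond lead [""] []) ++ b.1.flatMap (fun p => [p, ""])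

theorem pv_join_ne_empty {l : List String} (hne : l ≠ []) (h : ∀ x ∈ l, x ≠ "") :
    PySem.Str.join " " l ≠ "" := by
  match l with
  | [x] =>
    intro hc
    apply h x (by simp)
    apply pv_toList_inj
    have := congrArg String.toList hc
    simpa [PySem.Str.join, PySem.Chars.join_singleton] using this
  | x :: y :: t =>
    have hx : x ≠ "" := h x (by simp)
    have hx' : x.toList ≠ [] := fun hh => hx (pv_toList_inj (by simpa using hh))
    intro hc
    apply hx'
    have := congrArg String.toList hc
    simp only [PySem.Str.join, List.map_cons, PySem.Chars.join_cons_cons] at this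
    simp only [String.toList_ofList, String.toList_empty] at this
    rcases List.append_eq_nil_iff.mp (List.append_eq_nil_iff.mp this).1 with ⟨h1, _⟩
    exact h1

theorem pv_flatMap_concat (P : List String) (x : String) :
    (P ++ [x]).flatMap (fun p => [p, ""]) = P.flatMap (fun p => [p, ""]) ++ [x, ""] := by
  simp

theorem pv_last_shape (lead : Bool) (P : List String) (hP : P ≠ []) :
    ∃ X, (cond lead [""] []) ++ P.flatMap (fun p => [p, ""]) = X ++ [""] := by
  rcases pv_concat_of_ne_nil hP with ⟨q, p, rfl⟩
  exact ⟨(cond lead [""] []) ++ q.flatMap (fun p => [p, ""]) ++ [p], by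
    rw [pv_flatMap_concat]; simp⟩

theorem pvInv_step {R C P r : List String} (h : pvInv (R, C) (P, r)) (s : String) :
    pvInv (pvA_reflowStep (R, C) s) (pvB_step (P, r) s) := by
  obtain ⟨hC, hrun, hP, lead, hR⟩ := h
  simp only at hC hrun hP hR
  cases hC
  simp only [pvA_reflowStep, pvB_step]
  by_cases hs : PySem.Str.strip s = ""
  · simp only [hs, if_true, ne_eq, not_true_eq_false, if_false]
    by_cases hr : C = []
    · subst hr
      simp only [not_true_eq_false, if_false]
      by_cases hPe : P = []
      · subst hPe
        simp only [List.flatMap_nil, List.append_nil] at hR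
        cases lead with
        | false =>
          simp only [Bool.cond_false] at hR
          rw [if_pos (Or.inl hR)]
          exact ⟨rfl, hrun, hP, true, by simp [hR]⟩
        | true =>
          simp only [Bool.cond_true] at hR
          rw [if_neg (by rw [hR]; simp)]
          exact ⟨rfl, hrun, hP, true, by simp [hR]⟩
      · obtain ⟨X, hX⟩ := pv_last_shape lead P hPe
        rw [if_neg (by rw [hR, hX, List.getLast?_concat]; simp)]
        exact ⟨rfl, hrun, hP, lead, hR⟩
    · have hj : PySem.Str.join " " C ≠ "" := pv_join_ne_empty hr hrun
      simp only [hr, not_false_iff, if_true]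
      rw [if_pos (Or.inr (by rw [List.getLast?_concat]; simpa using hj))]
      refine ⟨rfl, by simp, ?_, lead, ?_⟩
      · intro p hp
        rcases List.mem_append.mp hp with hp | hp
        · exact hP p hp
        · simp at hp; subst hp; exact hj
      · rw [hR, pv_flatMap_concat]; simp
  · simp only [hs, ne_eq, not_false_iff, if_true]
    refine ⟨rfl, ?_, hP, lead, hR⟩
    intro x hx
    rcases List.mem_append.mp hx with hx | hx
    · exact hrun x hx
    · simp at hx; subst hx; exact hs

theorem pvInv_foldl {a b : List String × List String} (h : pvInv a b) (L : List String) :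
    pvInv (L.foldl pvA_reflowStep a) (L.foldl pvB_step b) := by
  induction L generalizing a b with
  | nil => exact h
  | cons x xs ih => exact ih (pvInv_step (R := a.1) (C := a.2) (P := b.1) (r := b.2) h x)

-- final filter on the invariant shape
theorem pv_finalPieces_lead (lead : Bool) (rest : List String) :
    pvA_finalPieces false ((cond lead [""] []) ++ rest) = pvA_finalPieces false rest := by
  cases lead <;> simp [pvA_finalPieces]

theorem pv_finalPieces_flatMap (P : List String) (hP : ∀ p ∈ P, p ≠ "") (t : List String) :
    pvA_finalPieces false (P.flatMap (fun p => [p, ""]) ++ t) =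
      P.flatMap (fun p => [p, ""]) ++ pvA_finalPieces false t := by
  induction P with
  | nil => simp
  | cons p q ih =>
    have hp : p ≠ "" := hP p (by simp)
    simp only [List.flatMap_cons, List.cons_append, List.nil_append]
    rw [pvA_finalPieces, if_pos hp, pvA_finalPieces]
    simp only [ne_eq, not_true_eq_false, if_false, if_true]
    rw [ih (fun x hx => hP x (by simp [hx]))]
    try simp [pvA_finalPieces]

theorem pv_finalPieces_flatMap' (P : List String) (hP : ∀ p ∈ P, p ≠ "") :
    pvA_finalPieces false (P.flatMap (fun p => [p, ""])) = P.flatMap (fun p => [p, ""]) := by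
  have := pv_finalPieces_flatMap P hP []
  simpa [pvA_finalPieces] using this

theorem pv_dropWhile_cons_ne (a : String) (l : List String) (ha : a ≠ "") :
    (a :: l).dropWhile (· == "") = a :: l := by
  rw [List.dropWhile_cons_of_neg]; simpa using ha

theorem pv_dropWhile_cons_empty (l : List String) :
    (("" : String) :: l).dropWhile (· == "") = l.dropWhile (· == "") := by
  rw [List.dropWhile_cons_of_pos]; simp

-- join over the sentinel shape: "\n\n" around the kept blanks = "\n\n\n\n" between paragraphs
theorem pv_chars_join_blank (r : List (List Char)) (hr : r ≠ []) :
    PySem.Chars.join ['\n','\n'] ([] :: r) = ['\n','\n'] ++ PySem.Chars.join ['\n','\n'] r := by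
  rcases r with _ | ⟨h, t⟩
  · simp at hr
  · rw [PySem.Chars.join_cons_cons]; simp

theorem pv_chars_join4 (L : List (List Char)) (x : List Char) :
    PySem.Chars.join ['\n','\n'] (L.flatMap (fun p => [p, []]) ++ [x]) =
      PySem.Chars.join ['\n','\n','\n','\n'] (L ++ [x]) := by
  induction L with
  | nil => simp
  | cons a L ih =>
    have hne : L.flatMap (fun p => [p, []]) ++ [x] ≠ [] := by simp
    simp only [List.flatMap_cons, List.cons_append, List.nil_append]
    rw [PySem.Chars.join_cons_cons, pv_chars_join_blank _ hne, ih]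
    have hne2 : L ++ [x] ≠ [] := by simp
    rcases List.exists_cons_of_ne_nil hne2 with ⟨h2, t2, he2⟩
    rw [he2, PySem.Chars.join_cons_cons]
    simp

theorem pv_join4_eq (P : List String) (x : String) :
    PySem.Str.join "\n\n" (P.flatMap (fun p => [p, ""]) ++ [x]) =
      PySem.Str.join "\n\n\n\n" (P ++ [x]) := by
  apply pv_toList_inj
  simp only [PySem.Str.join, String.toList_ofList]
  have hmap : ((P.flatMap (fun p => [p, ""]) ++ [x]).map String.toList) =
      ((P.map String.toList).flatMap (fun p => [p, []]) ++ [x.toList]) := by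
    induction P <;> simp_all
  rw [hmap]
  have h2 : ("\n\n" : String).toList = ['\n','\n'] := rfl
  have h4 : ("\n\n\n\n" : String).toList = ['\n','\n','\n','\n'] := rfl
  rw [h2, h4, pv_chars_join4 (P.map String.toList) x.toList]
  simp [List.map_append]

theorem pv_finalize (a b : List String × List String) (h : pvInv a b) :
    PySem.Str.join "\n\n"
      ((((pvA_finalPieces false
            (if a.2 ≠ [] then a.1 ++ [PySem.Str.join " " a.2] else a.1)).dropWhile
          (· == "")).reverse.dropWhile (· == "")).reverse) = pvB_finish b := by
  obtain ⟨R, C⟩ := a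
  obtain ⟨P, r⟩ := b
  obtain ⟨hC, hrun, hP, lead, hR⟩ := h
  simp only at hC hrun hP hR
  cases hC
  unfold pvB_finish
  dsimp only
  by_cases hr : C = []
  · subst hr
    simp only [ne_eq, not_true_eq_false, if_false]
    rw [hR, pv_finalPieces_lead, pv_finalPieces_flatMap' _ hP]
    by_cases hPe : P = []
    · subst hPe; rfl
    · rcases pv_concat_of_ne_nil hPe with ⟨q, p, rfl⟩
      have hq : ∀ x ∈ q, x ≠ "" := fun x hx => hP x (by simp [hx])
      have hp : p ≠ "" := hP p (by simp)
      rw [pv_flatMap_concat]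
      have hdw : (q.flatMap (fun p => [p, ""]) ++ [p, ""]).dropWhile (· == "") =
          q.flatMap (fun p => [p, ""]) ++ [p, ""] := by
        rcases q with _ | ⟨p0, q0⟩
        · simpa using pv_dropWhile_cons_ne p [""] hp
        · simpa using pv_dropWhile_cons_ne p0
            ("" :: (q0.flatMap (fun p => [p, ""]) ++ [p, ""])) (hq p0 (by simp))
      rw [hdw]
      rw [show q.flatMap (fun p => [p, ""]) ++ [p, ""] =
        (q.flatMap (fun p => [p, ""]) ++ [p]) ++ [""] by simp]
      rw [List.reverse_append]
      simp only [List.reverse_cons, List.reverse_nil, List.nil_append, List.singleton_append,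
        List.reverse_append]
      rw [pv_dropWhile_cons_empty, pv_dropWhile_cons_ne _ _ hp]
      rw [show (p :: (q.flatMap (fun p => [p, ""])).reverse).reverse =
        q.flatMap (fun p => [p, ""]) ++ [p] by simp]
      exact pv_join4_eq q p
  · have hj : PySem.Str.join " " C ≠ "" := pv_join_ne_empty hr hrun
    simp only [ne_eq, hr, not_false_iff, if_true]
    rw [hR, List.append_assoc, pv_finalPieces_lead, pv_finalPieces_flatMap _ hP]
    have hfp : pvA_finalPieces false [PySem.Str.join " " C] = [PySem.Str.join " " C] := by
      simp [pvA_finalPieces, hj]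
    rw [hfp]
    have hdw : (P.flatMap (fun p => [p, ""]) ++ [PySem.Str.join " " C]).dropWhile (· == "") =
        P.flatMap (fun p => [p, ""]) ++ [PySem.Str.join " " C] := by
      rcases P with _ | ⟨p0, q0⟩
      · simpa using pv_dropWhile_cons_ne (PySem.Str.join " " C) [] hj
      · simpa using pv_dropWhile_cons_ne p0
          ("" :: (q0.flatMap (fun p => [p, ""]) ++ [PySem.Str.join " " C])) (hP p0 (by simp))
    rw [hdw, List.reverse_append]
    simp only [List.reverse_cons, List.reverse_nil, List.nil_append, List.singleton_append]
    rw [pv_dropWhile_cons_ne _ _ hj]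
    rw [show (PySem.Str.join " " C :: (P.flatMap (fun p => [p, ""])).reverse).reverse =
      P.flatMap (fun p => [p, ""]) ++ [PySem.Str.join " " C] by simp]
    exact pv_join4_eq P (PySem.Str.join " " C)

-- ===== VERDICT (by name: the statement is the Claim_ definition above) =====
theorem clean_and_reflow_text_spec : Claim_equal_clean_and_reflow_text := by
  intro raw _
  show clean_and_reflow_text raw = clean_and_reflow_text_alt raw
  simp only [clean_and_reflow_text, clean_and_reflow_text_alt]
  rw [pvB_loop_eq]
  have h0 : pvInv (([], []) : List String × List String) (([], []) : List String × List String) :=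
    ⟨rfl, by simp, by simp, ⟨false, rfl⟩⟩
  exact pv_finalize _ _ (pvInv_foldl h0 (pvA_dehyph (PySem.Str.splitlines raw) 0))
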